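-- pv_equiv track=rewrite | github.com/justinmyersdata/ProjectEuler | 54_Project_Euler.py | pairlist
-- ===== SOURCE A (Python) =====
-- def pairlist(x):
--     final = []
--     pairs = {}
--
--     for number in x:
--         if number in pairs.keys():
--             pairs[number] += 1
--         else:
--             pairs[number] = 1
--
--     pair_list =  list(pairs.items())
--
--     for pair in pair_list:
--         temp = []
--         if pair[1] == 4:
--             temp.append(pair[0])
--         temp.sort()
--         final += temp
--
--     for pair in pair_list:
--         temp = []
--         if pair[1] == 3:
--             temp.append(pair[0])
--         temp.sort()
--         final += temp
--
--     for pair in pair_list: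
--         temp = []
--         if pair[1] == 2:
--             temp.append(pair[0])
--         temp.sort()
--         final += temp
--
--     for pair in pair_list:
--         temp = []
--         if pair[1] == 1:
--             temp.append(pair[0])
--         temp.sort()
--         final += temp
--
--     return final
-- ===== SOURCE B (Python) =====
-- def pairlist(x):
--     counts = {}
--     for n in x:
--         counts[n] = counts.get(n, 0) + 1
--     groups = {}
--     for n, c in counts.items():
--         groups.setdefault(c, []).append(n)
--     return groups.get(4, []) + groups.get(3, []) + groups.get(2, []) + groups.get(1, [])
-- ===== Notes on version B (the rewrite author's own statement) =====
-- stated objective: simpler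
-- what changed: Replaces A's four separate filtering scans over the counted items (each with a pointless per-item temp-list sort) by one bucket-building pass keyed by count, returning the concatenation of buckets 4,3,2,1.
import Mathlib
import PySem

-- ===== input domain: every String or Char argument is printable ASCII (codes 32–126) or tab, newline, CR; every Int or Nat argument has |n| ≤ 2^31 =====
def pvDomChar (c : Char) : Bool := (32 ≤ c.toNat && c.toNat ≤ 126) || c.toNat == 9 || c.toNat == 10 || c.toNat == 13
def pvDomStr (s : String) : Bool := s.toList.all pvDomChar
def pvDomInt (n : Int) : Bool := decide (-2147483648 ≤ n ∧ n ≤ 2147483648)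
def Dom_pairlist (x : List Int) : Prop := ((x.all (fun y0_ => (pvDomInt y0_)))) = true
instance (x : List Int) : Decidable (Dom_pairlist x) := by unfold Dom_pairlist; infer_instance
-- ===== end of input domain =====

-- B groups the counted items by count in one bucket-building pass instead of A's four filtering scans (simpler).


-- ===== PORT A =====
-- one pass of A's "temp=[]; if pair[1]==c: temp.append(pair[0]); temp.sort(); final+=temp" loop body
def pairlistPassStep (c : Int) (final : List Int) (pair : Int × Int) : List Int :=
  let temp : List Int := []
  let temp := if pair.2 == c then temp ++ [pair.1] else temp
  let temp := PySem.List.sorted temp (fun y => y) false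
  final ++ temp

def pairlist (x : List Int) : List Int :=
  let final : List Int := []
  let pairs : PySem.Dict Int Int := PySem.Dict.empty
  let pairs := x.foldl (fun pairs number =>
    if pairs.contains number then pairs.insert number (pairs.getD number 0 + 1)
    else pairs.insert number 1) (pairs : PySem.Dict Int Int)
  let pair_list := pairs.items
  let final := pair_list.foldl (pairlistPassStep 4) final
  let final := pair_list.foldl (pairlistPassStep 3) final
  let final := pair_list.foldl (pairlistPassStep 2) final
  let final := pair_list.foldl (pairlistPassStep 1) final
  final

-- ===== PORT B =====
def pairlist_alt (x : List Int) : List Int :=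
  let counts : PySem.Dict Int Int :=
    x.foldl (fun counts n => counts.insert n (counts.getD n 0 + 1)) PySem.Dict.empty
  let groups : PySem.Dict Int (List Int) :=
    counts.items.foldl (fun groups p => groups.modify p.2 [] (· ++ [p.1])) PySem.Dict.empty
  groups.getD 4 [] ++ groups.getD 3 [] ++ groups.getD 2 [] ++ groups.getD 1 []

-- ===== PRECONDITION & SPEC =====
def Spec_pairlist (x : List Int) (out : List Int) : Prop := out = pairlist_alt x
instance (x : List Int) (out : List Int) : Decidable (Spec_pairlist x out) := by unfold Spec_pairlist; infer_instance

-- ===== CLAIM (what is proved, stated in full; the proofs are below) =====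
def Claim_equal_pairlist : Prop := ∀ (x : List Int), Dom_pairlist x → Spec_pairlist x (pairlist x)

-- ===== LEMMAS AND PROOFS =====

-- A's branching counter update is the unconditional insert-of-getD+1 update
theorem pairlist_counter_step_eq (d : PySem.Dict Int Int) (n : Int) :
    (if d.contains n then d.insert n (d.getD n 0 + 1) else d.insert n 1)
      = d.insert n (d.getD n 0 + 1) := by
  by_cases h : d.contains n = true
  · simp [h]
  · simp only [Bool.not_eq_true] at h
    simp [h, PySem.Dict.getD_of_not_contains]

-- one of A's passes appends exactly the first-components of the pairs with count c
theorem pairlist_pass_eq (c : Int) (l : List (Int × Int)) (acc : List Int) :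
    l.foldl (pairlistPassStep c) acc
      = acc ++ (l.filter (fun p => p.2 == c)).map (·.1) := by
  have h : ∀ (acc : List Int) (p : Int × Int),
      pairlistPassStep c acc p = if p.2 == c then acc ++ [p.1] else acc := by
    intro acc p
    by_cases h : p.2 == c <;> simp [pairlistPassStep, h, PySem.List.sorted, PySem.List.insertBy]
  calc l.foldl (pairlistPassStep c) acc
      = l.foldl (fun acc p => if p.2 == c then acc ++ [p.1] else acc) acc := by
        congr 1; funext acc p; exact h acc p
    _ = acc ++ (l.filter (fun p => p.2 == c)).map (·.1) :=
        PySem.List.foldl_append_if _ _ _ _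

-- B's bucket table holds, at key c, the first-components of the pairs with count c
theorem pairlist_group_getD (l : List (Int × Int)) (g : PySem.Dict Int (List Int)) (c : Int) :
    (l.foldl (fun g p => g.modify p.2 [] (· ++ [p.1])) g).getD c []
      = g.getD c [] ++ (l.filter (fun p => p.2 == c)).map (·.1) := by
  induction l generalizing g with
  | nil => simp
  | cons p t ih =>
    simp only [List.foldl_cons, ih, List.filter_cons]
    rw [PySem.Dict.getD_modify]
    by_cases h : p.2 = c
    · simp [h]
    · have h' : (p.2 == c) = false := by simp [h]
      simp [h', Ne.symm h]

-- ===== VERDICT (by name: the statement is the Claim_ definition above) =====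
theorem pairlist_spec : Claim_equal_pairlist := by
  intro x _
  unfold Spec_pairlist pairlist pairlist_alt
  simp only [pairlist_pass_eq, pairlist_group_getD, PySem.Dict.getD_empty]
  have hc : x.foldl (fun pairs number =>
      if pairs.contains number then pairs.insert number (pairs.getD number 0 + 1)
      else pairs.insert number 1) (PySem.Dict.empty : PySem.Dict Int Int)
    = x.foldl (fun counts n => counts.insert n (counts.getD n 0 + 1)) PySem.Dict.empty := by
    congr 1; funext d n; exact pairlist_counter_step_eq d n
  rw [hc]
  simp [List.append_assoc]
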